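-- pv_equiv track=rewrite | github.com/datooff24/pyt_sol_htlacs | Chapter 14/Ex14.5.py | prime_misses
-- ===== SOURCE A (Python) =====
-- def is_prime(n):
--     if n == 1:
--         return False
--     elif n == 2:
--         return True
--     else:
--         for i in range(2, n):
--             if n % i == 0:
--                 return False
--         return True
--
-- def prime_num_list(upper_bound):
--     num_list = list(range(2,upper_bound+1))  # go through all numbers from 2 up to and including upper bound
--     prime_list = []
--     for num in num_list:  # filter out the non-prime numbers in num_list
--         if is_prime(num):
--             prime_list.append(num)
--     return prime_list
--
-- def prime_misses(tickets):
--     # merge all the numbers in tickets into one single list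
--     merge_list = []
--     for item in tickets:
--         merge_list += item
--     # filter out all the duplicates
--     merge_list_filter = []
--     for item in merge_list:
--         if item not in merge_list_filter:
--             merge_list_filter.append(item)
--     # generate a prime_num_list with upper_bound 49 since the balls are numbered 1 to 49
--     prime_list = prime_num_list(49)
--     # compare prime_list to merge_list_filter
--     missed_primes = []
--     for item in prime_list:
--         if item not in merge_list_filter:
--             missed_primes.append(item)
--     return missed_primes
-- ===== SOURCE B (Python) =====
-- def prime_misses(tickets):
--     # One pass: collect all ticket numbers into a set.
--     seen = set()
--     for item in tickets:
--         seen.update(item)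
--     # Sieve of Eratosthenes up to 49.
--     sieve = [True] * 50
--     sieve[0] = False
--     sieve[1] = False
--     for i in range(2, 8):
--         if sieve[i]:
--             for j in range(i * i, 50, i):
--                 sieve[j] = False
--     # Collect primes 2..49 missing from the tickets, in ascending order.
--     missed = []
--     for i in range(2, 50):
--         if sieve[i]:
--             if i not in seen:
--                 missed.append(i)
--     return missed
-- ===== Notes on version B (the rewrite author's own statement) =====
-- stated objective: faster
-- what changed: Replaces the quadratic merge-then-dedup list scans with a single set built in one pass, and trial-division primality testing with a Sieve of Eratosthenes over 0..49.
import Mathlib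
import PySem

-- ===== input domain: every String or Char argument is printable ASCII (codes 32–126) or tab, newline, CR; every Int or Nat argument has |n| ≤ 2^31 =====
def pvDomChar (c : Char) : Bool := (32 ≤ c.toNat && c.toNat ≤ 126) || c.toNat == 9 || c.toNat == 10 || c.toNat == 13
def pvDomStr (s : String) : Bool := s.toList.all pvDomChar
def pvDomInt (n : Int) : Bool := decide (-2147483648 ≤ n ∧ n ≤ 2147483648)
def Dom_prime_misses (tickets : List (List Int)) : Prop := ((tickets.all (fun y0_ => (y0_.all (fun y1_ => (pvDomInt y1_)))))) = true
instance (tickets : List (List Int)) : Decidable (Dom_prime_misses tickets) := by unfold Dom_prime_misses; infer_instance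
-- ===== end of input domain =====

-- B replaces A's quadratic merge-then-dedup list scans with a set built in one pass and
-- trial-division primality with a Sieve of Eratosthenes over 0..49 (objective: faster).


-- ===== PORT A =====
def is_prime (n : Int) : Bool :=
  if n == 1 then false
  else if n == 2 then true
  else  -- 'for i in range(2, n): if n % i == 0: return False / return True' = no i in the range divides n
    (PySem.List.pyRange 2 n 1).all (fun i => !(PySem.Int.mod n i == 0))

def prime_num_list (upper_bound : Int) : List Int :=
  let num_list := PySem.List.pyRange 2 (upper_bound + 1) 1
  num_list.foldl (fun prime_list num => if is_prime num then prime_list ++ [num] else prime_list) []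

def prime_misses (tickets : List (List Int)) : List Int :=
  let merge_list := tickets.foldl (fun acc item => acc ++ item) []
  let merge_list_filter :=
    merge_list.foldl (fun acc item => if item ∈ acc then acc else acc ++ [item]) []
  let prime_list := prime_num_list 49
  prime_list.foldl (fun acc item => if item ∈ merge_list_filter then acc else acc ++ [item]) []

-- ===== PORT B =====
def prime_misses_alt (tickets : List (List Int)) : List Int :=
  let seen := tickets.foldl (fun s item => PySem.Set.update s item) PySem.Set.empty
  let sieve0 := PySem.List.pySetD (PySem.List.pySetD (List.replicate 50 true) 0 false) 1 false
  let sieve := (PySem.List.pyRange 2 8 1).foldl (fun sv i =>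
      if sv.getD i.toNat false then
        (PySem.List.pyRange (i * i) 50 i).foldl (fun sv j => PySem.List.pySetD sv j false) sv
      else sv) sieve0
  -- 'sieve[i]' with i always a nonnegative in-range index: getD i.toNat is exact there
  (PySem.List.pyRange 2 50 1).foldl (fun missed i =>
      if sieve.getD i.toNat false then
        (if i ∈ seen then missed else missed ++ [i])
      else missed) []

-- ===== PRECONDITION & SPEC =====
def Spec_prime_misses (tickets : List (List Int)) (out : List Int) : Prop := out = prime_misses_alt tickets
instance (tickets : List (List Int)) (out : List Int) : Decidable (Spec_prime_misses tickets out) := by unfold Spec_prime_misses; infer_instance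

-- ===== CLAIM (what is proved, stated in full; the proofs are below) =====
def Claim_equal_prime_misses : Prop := ∀ (tickets : List (List Int)), Dom_prime_misses tickets → Spec_prime_misses tickets (prime_misses tickets)

-- ===== LEMMAS AND PROOFS =====

-- the primes ≤ 49, the value both prime generators produce
def pvPrimesLit : List Int := [2, 3, 5, 7, 11, 13, 17, 19, 23, 29, 31, 37, 41, 43, 47]

-- the sieve array B's loops produce (checked by kernel computation below)
def pvSieveLit : List Bool := [false, false, true, true, false, true, false, true, false, false,
  false, true, false, true, false, false, false, true, false, true,
  false, false, false, true, false, false, false, false, false, true,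
  false, true, false, false, false, false, false, true, false, false,
  false, true, false, true, false, false, false, true, false, false]

lemma pv_prime_num_list_49 : prime_num_list 49 = pvPrimesLit := by decide

set_option maxRecDepth 4000 in
lemma pv_sieve_eq :
    (PySem.List.pyRange 2 8 1).foldl (fun sv i =>
      if sv.getD i.toNat false then
        (PySem.List.pyRange (i * i) 50 i).foldl (fun sv j => PySem.List.pySetD sv j false) sv
      else sv)
      (PySem.List.pySetD (PySem.List.pySetD (List.replicate 50 true) 0 false) 1 false)
    = pvSieveLit := by decide

-- A's merge loop is flatten
lemma pv_merge_eq (tickets : List (List Int)) :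
    tickets.foldl (fun acc item => acc ++ item) [] = tickets.flatten := by
  simpa using PySem.List.foldl_append_eq_flatMap (fun x => x) tickets ([] : List Int)

-- A's dedup loop is Set.ofList
lemma pv_dedup_eq (l : List Int) :
    l.foldl (fun acc item => if item ∈ acc then acc else acc ++ [item]) [] = PySem.Set.ofList l := by
  rw [PySem.Set.ofList_eq_foldl]
  exact PySem.List.foldl_congr_mem l _ _ [] (fun acc x _ => (PySem.Set.add_eq_ite acc x).symm)

-- membership in B's one-pass set
lemma pv_mem_seen (tickets : List (List Int)) (y : Int) (s : PySem.Set Int) :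
    y ∈ tickets.foldl (fun s item => PySem.Set.update s item) s ↔ y ∈ s ∨ y ∈ tickets.flatten := by
  induction tickets generalizing s with
  | nil => simp
  | cons t ts ih => simp [ih, PySem.Set.mem_update, or_assoc]

-- a filter-style append loop over a prop test, branch order as in the ports
lemma pv_loop_eq_filter (l : List Int) (fl : List Int) (init : List Int) :
    l.foldl (fun acc item => if item ∈ fl then acc else acc ++ [item]) init
    = init ++ l.filter (fun i => decide (i ∉ fl)) := by
  refine (PySem.List.foldl_congr_mem l _ (fun acc item => if item ∉ fl then acc ++ [item] else acc)
    ?_ (init := init)).trans ?_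
  · intro acc x _; by_cases h : x ∈ fl <;> simp [h]
  rw [PySem.List.foldl_append_ite_eq_filter]

-- B's final sieve loop collapses to a filter of the literal prime list
lemma pv_alt_loop_eq (seen : List Int) :
    (PySem.List.pyRange 2 50 1).foldl (fun missed i =>
      if pvSieveLit.getD i.toNat false then
        (if i ∈ seen then missed else missed ++ [i])
      else missed) []
    = pvPrimesLit.filter (fun i => decide (i ∉ seen)) := by
  refine (PySem.List.foldl_congr_mem (PySem.List.pyRange 2 50 1) _
      (fun acc i => if (pvSieveLit.getD i.toNat false = true) ∧ i ∉ seen then acc ++ [i] else acc)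
      ?_ (init := [])).trans ?_
  · intro acc x _
    by_cases h1 : pvSieveLit.getD x.toNat false = true <;> by_cases h2 : x ∈ seen <;> simp [h2]
  rw [PySem.List.foldl_append_ite_eq_filter]
  have key : (PySem.List.pyRange 2 50 1).filter (fun i => decide ((pvSieveLit.getD i.toNat false = true) ∧ i ∉ seen))
      = ((PySem.List.pyRange 2 50 1).filter (fun i => pvSieveLit.getD i.toNat false)).filter (fun i => decide (i ∉ seen)) := by
    rw [List.filter_filter]
    apply List.filter_congr
    intro x _
    by_cases h1 : pvSieveLit.getD x.toNat false = true <;> by_cases h2 : x ∈ seen <;> simp [h2]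
  have h2 : (PySem.List.pyRange 2 50 1).filter (fun i => pvSieveLit.getD i.toNat false) = pvPrimesLit := by decide
  rw [key, h2]
  simp

-- ===== VERDICT (by name: the statement is the Claim_ definition above) =====
theorem prime_misses_spec : Claim_equal_prime_misses := by
  intro tickets _
  unfold Spec_prime_misses
  simp only [prime_misses, prime_misses_alt]
  rw [pv_merge_eq, pv_dedup_eq, pv_prime_num_list_49, pv_sieve_eq,
      pv_loop_eq_filter, pv_alt_loop_eq]
  simp only [List.nil_append]
  apply List.filter_congr
  intro x _
  have h1 : x ∈ PySem.Set.ofList tickets.flatten ↔ x ∈ tickets.flatten := PySem.Set.mem_ofList _ _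
  have h2 : x ∈ tickets.foldl (fun s item => PySem.Set.update s item) ([] : PySem.Set Int) ↔ x ∈ tickets.flatten := by
    rw [pv_mem_seen]; simp
  by_cases h : x ∈ tickets.flatten <;> simp [h1, h2, h]
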